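-- pv_equiv track=rewrite | github.com/teofanaenachioiu/University-Courses | Logica/Aplicatie Logica/operatii.py | scadere
-- ===== SOURCE A (Python) =====
-- def zerorizare(numar,diferenta):
--     '''
--     Adaugarea de zerouri neseminificative la inceputul numarului.
--     :prarm numar: lista de cifre
--     :param diferenta: numar natural (exprima numarul de cifre de zero de adaugat)
--     :return nr: lista de cifre
--     '''
--     zero=[0]*diferenta
--     nr=zero+numar
--     return nr
--
-- def eliminareZeroNesemnificativ(numar):
--     '''
--     Eliminarea de zerouri nesemnificative de la inceputul cuvantului
--     :param numar: lista de cifre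
--     :return numar: lista de cifre (dupa eliminare)
--     '''
--     while len(numar)>1 and numar[0]==0:
--             numar=numar[1:]
--     return numar
--
-- def scadere(numar1,numar2,baza):
--     '''
--     Se efectueaza scaderea a doua numere intr-o baza oarecare
--     Preconditii: numar1>=numar2
--     :param numar1,numar2: lista de cifre
--     :return diferenta: lista de cifre
--     '''
--     index=len(numar1)-1
--     nr1=numar1
--     nr2=zerorizare(numar2, index-len(numar2)+1)
--     t=0
--     diferenta=[0]*(index+1)
--     while index>=0:
--         if nr1[index]+t >= nr2[index]:
--             diferenta[index]=nr1[index]+t-nr2[index]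
--             t=0
--         else:
--             diferenta[index]=baza+nr1[index]+t-nr2[index]
--             t=-1
--         index=index-1
--     diferenta=eliminareZeroNesemnificativ(diferenta)
--     return diferenta
-- ===== SOURCE B (Python) =====
-- def scadere(numar1, numar2, baza):
--     m = len(numar1)
--     nr2 = ([0] * (m - len(numar2)) + numar2)[:m]
--     digits = []
--     for j in range(m):
--         t = -1 if numar1[j + 1:] < nr2[j + 1:] else 0
--         d = numar1[j] + t - nr2[j]
--         if d < 0:
--             d += baza
--         digits.append(d)
--     for i, d in enumerate(digits):
--         if d:
--             return digits[i:]
--     return digits[-1:]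
-- ===== Notes on version B (the rewrite author's own statement) =====
-- stated objective: alternative
-- what changed: Replaces A's stateful right-to-left borrow-propagation loop by a stateless two-pass computation: the borrow entering each position equals a lexicographic comparison of the digit suffixes, so every output digit is computed independently.
import Mathlib
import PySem

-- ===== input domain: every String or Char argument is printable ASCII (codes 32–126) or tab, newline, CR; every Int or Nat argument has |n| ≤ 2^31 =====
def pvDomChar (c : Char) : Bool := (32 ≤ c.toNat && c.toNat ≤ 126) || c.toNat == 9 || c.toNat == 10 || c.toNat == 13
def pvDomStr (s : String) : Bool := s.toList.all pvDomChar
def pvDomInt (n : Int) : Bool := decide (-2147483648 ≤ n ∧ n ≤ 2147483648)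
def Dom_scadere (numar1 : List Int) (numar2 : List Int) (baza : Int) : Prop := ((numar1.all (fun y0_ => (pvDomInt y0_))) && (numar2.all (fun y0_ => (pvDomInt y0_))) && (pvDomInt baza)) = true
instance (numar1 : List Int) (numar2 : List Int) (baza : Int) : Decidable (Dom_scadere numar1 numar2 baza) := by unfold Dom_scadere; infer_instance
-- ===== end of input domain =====

-- B replaces A's stateful right-to-left borrow loop by a stateless two-pass computation
-- (the borrow at each position is a lexicographic suffix comparison); equal everywhere.

-- ===== PORT A =====

-- [0]*diferenta ++ numar  ([0]*d is [] for d ≤ 0, exactly Int.toNat's clamping)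
def zerorizareL (numar : List Int) (diferenta : Int) : List Int :=
  List.replicate diferenta.toNat 0 ++ numar

-- while len(numar)>1 and numar[0]==0: numar = numar[1:]
def elimZeroL : List Int → List Int
  | a :: b :: rest => if a = 0 then elimZeroL (b :: rest) else a :: b :: rest
  | l => l

-- A's while-loop, index counting down from len(numar1)-1 to 0; each step writes
-- diferenta[index] (here: conses onto the already-built tail).  The indexing
-- nr1[index] / nr2[index] is always in range in A (nr2 is padded to len(numar1),
-- or is a longer numar2 whose prefix gets read), so List.getD is exact.
def scadereLoop (nr1 nr2 : List Int) (baza : Int) : Nat → Int → List Int → List Int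
  | 0, _, acc => acc
  | i + 1, t, acc =>
    let x := nr1.getD i 0
    let y := nr2.getD i 0
    if x + t ≥ y then scadereLoop nr1 nr2 baza i 0 ((x + t - y) :: acc)
    else scadereLoop nr1 nr2 baza i (-1) ((baza + x + t - y) :: acc)

def scadere (numar1 : List Int) (numar2 : List Int) (baza : Int) : List Int :=
  let index : Int := (numar1.length : Int) - 1
  let nr2 := zerorizareL numar2 (index - (numar2.length : Int) + 1)
  elimZeroL (scadereLoop numar1 nr2 baza numar1.length 0 [])

-- ===== PORT B =====

-- Python's list '<' (lexicographic); exact for Int lists.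
def pyLtList : List Int → List Int → Bool
  | [], [] => false
  | [], _ :: _ => true
  | _ :: _, [] => false
  | a :: xs, b :: ys => if a < b then true else if b < a then false else pyLtList xs ys

-- one position of B's first pass: numar1[j+1:] / nr2[j+1:] are drops (j ≥ 0),
-- numar1[j] / nr2[j] are in range for j < m, so List.getD is exact
def digitAt (nr1 nr2 : List Int) (baza : Int) (j : Nat) : Int :=
  let t : Int := if pyLtList (nr1.drop (j + 1)) (nr2.drop (j + 1)) then -1 else 0
  let d := nr1.getD j 0 + t - nr2.getD j 0
  if d < 0 then d + baza else d

-- for i, d in enumerate(digits): if d: return digits[i:] -- else return digits[-1:]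
def stripLead : List Int → List Int
  | [] => []
  | [d] => [d]
  | d :: rest => if d ≠ 0 then d :: rest else stripLead rest

def scadere_alt (numar1 : List Int) (numar2 : List Int) (baza : Int) : List Int :=
  let m := numar1.length
  -- ([0] * (m - len(numar2)) + numar2)[:m]  (Nat subtraction clamps like [0]*negative)
  let nr2 := (List.replicate (m - numar2.length) 0 ++ numar2).take m
  stripLead ((List.range m).map (digitAt numar1 nr2 baza))

-- ===== PRECONDITION & SPEC =====
-- A is total (its indexing never leaves range), so there is no Pre_.

def Spec_scadere (numar1 : List Int) (numar2 : List Int) (baza : Int) (out : List Int) : Prop := out = scadere_alt numar1 numar2 baza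
instance (numar1 : List Int) (numar2 : List Int) (baza : Int) (out : List Int) : Decidable (Spec_scadere numar1 numar2 baza out) := by unfold Spec_scadere; infer_instance

-- ===== CLAIM (what is proved, stated in full; the proofs are below) =====
def Claim_equal_scadere : Prop := ∀ (numar1 : List Int) (numar2 : List Int) (baza : Int), Dom_scadere numar1 numar2 baza → Spec_scadere numar1 numar2 baza (scadere numar1 numar2 baza)

-- ===== LEMMAS AND PROOFS =====

theorem elim_eq_strip : ∀ l : List Int, elimZeroL l = stripLead l := by
  intro l
  induction l with
  | nil => rfl
  | cons a tl ih =>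
      cases tl with
      | nil => rfl
      | cons b rest =>
          by_cases h : a = 0
          · simp [elimZeroL, stripLead, h, ih]
          · simp [elimZeroL, stripLead, h]

-- A's loop reads nr2 only below index i, so it only sees nr2.take m (m ≥ i)
theorem loop_take (nr1 nr2 : List Int) (b : Int) (m : Nat) (hm : m ≤ nr2.length) :
    ∀ (i : Nat), i ≤ m → ∀ (t : Int) (acc : List Int),
      scadereLoop nr1 nr2 b i t acc = scadereLoop nr1 (nr2.take m) b i t acc := by
  intro i
  induction i with
  | zero => intro _ t acc; rfl
  | succ i ih =>
      intro hi t acc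
      have hj : i < m := by omega
      have hget : (nr2.take m).getD i 0 = nr2.getD i 0 := by
        rw [List.getD_eq_getElem _ _ (by simp; omega), List.getD_eq_getElem _ _ (by omega),
          List.getElem_take]
      simp only [scadereLoop, hget]
      split_ifs <;> exact ih (by omega) _ _

-- the borrow entering position i (incoming t when the loop counter is i) is exactly
-- the lexicographic comparison of the suffixes from i on, for equal-length lists
theorem borrow_lex (x y t' : Int) (s1 s2 : List Int)
    (h : pyLtList s1 s2 = true ↔ t' = -1) (h0 : t' = -1 ∨ t' = 0) :
    pyLtList (x :: s1) (y :: s2) = true ↔ x + t' < y := by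
  simp only [pyLtList]
  split_ifs with h1 h2
  · simp only [true_iff]; omega
  · constructor
    · intro hc; exact absurd hc (by simp)
    · intro hc; omega
  · have hxy : x = y := by omega
    rw [h]
    omega

-- main invariant: with the incoming borrow given by the suffix comparison, A's loop
-- emits exactly B's independently-computed digits for positions 0..i-1
theorem loop_lex (nr1 nr2 : List Int) (b : Int) (hlen : nr1.length = nr2.length) :
    ∀ (i : Nat), i ≤ nr1.length → ∀ (acc : List Int),
      scadereLoop nr1 nr2 b i (if pyLtList (nr1.drop i) (nr2.drop i) then -1 else 0) acc =
        (List.range i).map (digitAt nr1 nr2 b) ++ acc := by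
  intro i
  induction i with
  | zero => intro _ acc; simp [scadereLoop]
  | succ i ih =>
      intro hi acc
      have hlt1 : i < nr1.length := by omega
      have hlt2 : i < nr2.length := by omega
      have hdrop1 : nr1.drop i = nr1[i] :: nr1.drop (i + 1) := List.drop_eq_getElem_cons hlt1
      have hdrop2 : nr2.drop i = nr2[i] :: nr2.drop (i + 1) := List.drop_eq_getElem_cons hlt2
      set t' : Int := if pyLtList (nr1.drop (i + 1)) (nr2.drop (i + 1)) then -1 else 0 with ht'
      have hiff : pyLtList (nr1.drop (i + 1)) (nr2.drop (i + 1)) = true ↔ t' = -1 := by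
        rw [ht']; split_ifs with h <;> simp [h]
      have hbor := borrow_lex nr1[i] nr2[i] t' (nr1.drop (i + 1)) (nr2.drop (i + 1)) hiff
        (by rw [ht']; split_ifs <;> simp)
      -- the outgoing borrow (incoming for position i-1) is again a suffix comparison
      have hstep : (if pyLtList (nr1.drop i) (nr2.drop i) then (-1 : Int) else 0) =
          if nr1[i] + t' ≥ nr2[i] then 0 else -1 := by
        rw [hdrop1, hdrop2]
        rcases Bool.eq_false_or_eq_true
            (pyLtList (nr1[i] :: nr1.drop (i + 1)) (nr2[i] :: nr2.drop (i + 1))) with h | h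
        · rw [h] at hbor ⊢
          have hbd : nr1[i] + t' < nr2[i] := hbor.mp rfl
          rw [if_pos rfl, if_neg (by omega)]
        · rw [h] at hbor ⊢
          have hnb : ¬ (nr1[i] + t' < nr2[i]) := fun hc => Bool.false_ne_true (hbor.mpr hc)
          rw [if_neg (by simp), if_pos (by omega)]
      have hdig : digitAt nr1 nr2 b i =
          if nr1[i] + t' ≥ nr2[i] then nr1[i] + t' - nr2[i] else b + nr1[i] + t' - nr2[i] := by
        simp only [digitAt, ← ht', List.getD_eq_getElem _ _ hlt1, List.getD_eq_getElem _ _ hlt2]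
        split_ifs <;> omega
      rw [List.range_succ, List.map_append]
      simp only [scadereLoop, List.getD_eq_getElem _ _ hlt1, List.getD_eq_getElem _ _ hlt2]
      by_cases hbr : nr1[i] + t' ≥ nr2[i]
      · rw [if_pos hbr]
        have ih0 := ih (by omega) ((nr1[i] + t' - nr2[i]) :: acc)
        rw [hstep, if_pos hbr] at ih0
        rw [ih0]
        simp [hdig, hbr]
      · rw [if_neg hbr]
        have ih0 := ih (by omega) ((b + nr1[i] + t' - nr2[i]) :: acc)
        rw [hstep, if_neg hbr] at ih0
        rw [ih0]
        simp [hdig, hbr]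

-- ===== VERDICT (by name: the statement is the Claim_ definition above) =====
theorem scadere_spec : Claim_equal_scadere := by
  intro numar1 numar2 baza _hdom
  unfold Spec_scadere
  set m := numar1.length with hm
  have hcast : (((m : Int) - 1) - (numar2.length : Int) + 1).toNat = m - numar2.length := by
    omega
  set nr2 : List Int := List.replicate (m - numar2.length) 0 ++ numar2 with hnr2
  have hA : scadere numar1 numar2 baza = elimZeroL (scadereLoop numar1 nr2 baza m 0 []) := by
    simp only [scadere, zerorizareL, hnr2, ← hm]
    rw [hcast]
  have hlenle : m ≤ nr2.length := by simp [hnr2]; omega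
  have hlen2 : (nr2.take m).length = m := by simp; omega
  have h0 : (if pyLtList (numar1.drop m) ((nr2.take m).drop m) then (-1 : Int) else 0) = 0 := by
    rw [hm, List.drop_length]
    rw [show (nr2.take m).drop m = [] from List.drop_of_length_le (by omega)]
    rfl
  have hlex := loop_lex numar1 (nr2.take m) baza (by omega) m (by omega) ([] : List Int)
  rw [h0] at hlex
  rw [hA, loop_take numar1 nr2 baza m hlenle m le_rfl 0 [], hlex, elim_eq_strip,
    List.append_nil]
  rfl
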